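-- pv_equiv track=rewrite | github.com/hbobenicio/advent-of-code | 2025/06/main.py | A
-- ===== SOURCE A (Python) =====
-- def A(operands: list[list[int]], operators: list[str]) -> int:
--     def expr_eval(col: int) -> int:
--         operator: str = operators[col]
--         match operator:
--             case '+':
--                 total = 0
--                 for row in range(len(operands)):
--                     operand: int = operands[row][col]
--                     total += operand
--                 return total
--
--             case '*':
--                 total = 1
--                 for row in range(len(operands)):
--                     operand: int = operands[row][col]
--                     total *= operand
--                 return total
--
--             case _:
--                 assert(False)
--
--     grand_total = 0
--     cols = len(operands[0])
--     for col in range(cols):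
--         grand_total += expr_eval(col)
--
--     return grand_total
-- ===== SOURCE B (Python) =====
-- def A(operands: list[list[int]], operators: list[str]) -> int:
--     cols = len(operands[0])
--     acc = []
--     for col in range(cols):
--         op = operators[col]
--         if op == '+':
--             acc.append(0)
--         elif op == '*':
--             acc.append(1)
--         else:
--             assert False
--     for row in operands:
--         for col in range(cols):
--             if operators[col] == '+':
--                 acc[col] += row[col]
--             else:
--                 acc[col] *= row[col]
--     return sum(acc)
-- ===== Notes on version B (the rewrite author's own statement) =====
-- stated objective: alternative
-- what changed: Replaces A's per-column evaluation (a nested inner loop over all rows for each column) by a single row-major sweep that carries a per-column accumulator vector, initialized once from the operators and summed at the end.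
import Mathlib
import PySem

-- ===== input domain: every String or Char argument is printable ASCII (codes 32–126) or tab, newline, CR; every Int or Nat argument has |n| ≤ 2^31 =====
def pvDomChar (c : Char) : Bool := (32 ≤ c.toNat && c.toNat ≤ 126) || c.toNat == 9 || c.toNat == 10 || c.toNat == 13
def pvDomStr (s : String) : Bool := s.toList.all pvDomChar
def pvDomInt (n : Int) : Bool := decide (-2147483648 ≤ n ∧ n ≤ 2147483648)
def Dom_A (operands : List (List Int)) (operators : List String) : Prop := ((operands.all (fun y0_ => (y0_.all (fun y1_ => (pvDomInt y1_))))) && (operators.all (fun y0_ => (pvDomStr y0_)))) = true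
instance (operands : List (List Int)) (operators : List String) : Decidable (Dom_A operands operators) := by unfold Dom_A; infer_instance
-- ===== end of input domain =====

-- B replaces A's column-at-a-time evaluation by one row-major sweep over an accumulator
-- vector (objective: alternative decomposition; same asymptotic cost).
-- ===== PORT A =====
-- expr_eval(col): fold the whole column to completion according to operators[col]
def AExprEval (operands : List (List Int)) (operators : List String) (col : Int) : Int :=
  let op := PySem.List.pyGetD operators col ""
  if op = "+" then
    (PySem.List.pyRange 0 (PySem.List.len operands) 1).foldl
      (fun total row => total + PySem.List.pyGetD (PySem.List.pyGetD operands row []) col 0) 0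
  else if op = "*" then
    (PySem.List.pyRange 0 (PySem.List.len operands) 1).foldl
      (fun total row => total * PySem.List.pyGetD (PySem.List.pyGetD operands row []) col 0) 1
  else 0  -- assert False: unreachable inside Pre_A

def A (operands : List (List Int)) (operators : List String) : Int :=
  let cols : Nat := (PySem.List.pyGetD operands 0 []).length
  (PySem.List.pyRange 0 (cols : Int) 1).foldl
    (fun grand col => grand + AExprEval operands operators col) 0

-- ===== PORT B =====
-- accumulator for column col: 0 for '+', 1 for '*' (assert False otherwise)
def BInit (operators : List String) (col : Nat) : Int :=
  if PySem.List.pyGetD operators (col : Int) "" = "+" then 0 else 1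

-- folding row[col] into the accumulator a according to operators[col]
def BStep (operators : List String) (row : List Int) (col : Nat) (a : Int) : Int :=
  let v := PySem.List.pyGetD row (col : Int) 0
  if PySem.List.pyGetD operators (col : Int) "" = "+" then a + v else a * v

def A_alt (operands : List (List Int)) (operators : List String) : Int :=
  let cols : Nat := (PySem.List.pyGetD operands 0 []).length
  let acc0 : List Int := (List.range cols).map (BInit operators)
  -- one row-major sweep folding each row into the accumulator vector
  let acc : List Int := operands.foldl
    (fun acc row => acc.zipIdx.map (fun p : Int × Nat => BStep operators row p.2 p.1)) acc0
  acc.sum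

-- ===== PRECONDITION & SPEC =====
-- Pre_A excludes exactly the inputs where the Python A raises: empty operands (IndexError
-- on operands[0]), a row or the operators list too short for the first row's width
-- (IndexError), and an operator other than '+'/'*' among the used columns (AssertionError).
def Pre_A (operands : List (List Int)) (operators : List String) : Prop :=
  operands ≠ [] ∧
  (∀ row ∈ operands, (operands.headD []).length ≤ row.length) ∧
  (operands.headD []).length ≤ operators.length ∧
  (∀ c < (operands.headD []).length,
    operators.getD c "" = "+" ∨ operators.getD c "" = "*")
instance (operands : List (List Int)) (operators : List String) : Decidable (Pre_A operands operators) := by unfold Pre_A; infer_instance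
def pvWitness_A : List (List Int) × List String := ([[1, 2], [3, 4]], ["+", "*"])

def Spec_A (operands : List (List Int)) (operators : List String) (out : Int) : Prop := out = A_alt operands operators
instance (operands : List (List Int)) (operators : List String) (out : Int) : Decidable (Spec_A operands operators out) := by unfold Spec_A; infer_instance

-- ===== CLAIM (what is proved, stated in full; the proofs are below) =====
def Claim_equal_A : Prop := ∀ (operands : List (List Int)) (operators : List String), Dom_A operands operators → Pre_A operands operators → Spec_A operands operators (A operands operators)

-- ===== LEMMAS AND PROOFS =====

-- one step of the row-major sweep, acting on an accumulator vector that is a map over range n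
theorem zipIdx_map_step (n : Nat) (g : Nat → Int → Int) (init : Nat → Int) :
    ((List.range n).map init).zipIdx.map (fun p : Int × Nat => g p.2 p.1)
      = (List.range n).map (fun c => g c (init c)) := by
  apply List.ext_getElem
  · simp
  · intro i h1 h2
    simp

-- exchanging the loop order: the row-major sweep computes the per-column folds
theorem exchange (n : Nat) (g : Nat → Int → List Int → Int) (init : Nat → Int)
    (rows : List (List Int)) :
    rows.foldl (fun acc row => acc.zipIdx.map (fun p : Int × Nat => g p.2 p.1 row))
        ((List.range n).map init)
      = (List.range n).map (fun c => rows.foldl (fun a row => g c a row) (init c)) := by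
  induction rows generalizing init with
  | nil => rfl
  | cons row rest ih =>
      simp only [List.foldl_cons]
      rw [zipIdx_map_step n (fun c a => g c a row) init, ih (fun c => g c (init c) row)]

-- per-column agreement: A's expr_eval(c) is B's column fold, given operators[c] ∈ {+, *}
theorem col_eq (operands : List (List Int)) (operators : List String) (c : Nat)
    (h : operators.getD c "" = "+" ∨ operators.getD c "" = "*") :
    AExprEval operands operators (c : Int)
      = operands.foldl (fun a row => BStep operators row c a) (BInit operators c) := by
  have hg : PySem.List.pyGetD operators (c : Int) "" = operators.getD c "" := by
    simp
  rcases h with h | h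
  · simp only [AExprEval, BStep, BInit, hg, h, PySem.List.len_eq, if_pos, if_true]
    rw [PySem.List.foldl_pyRange_zero_pyGetD' operands []
      (fun total row => total + PySem.List.pyGetD row (c : Int) 0) 0]
  · simp only [AExprEval, BStep, BInit, hg, h, PySem.List.len_eq,
      if_neg (show ¬("*" = "+") by decide), if_true]
    rw [PySem.List.foldl_pyRange_zero_pyGetD' operands []
      (fun total row => total * PySem.List.pyGetD row (c : Int) 0) 1]

theorem A_eq_alt : ∀ (operands : List (List Int)) (operators : List String),
    Pre_A operands operators → A operands operators = A_alt operands operators := by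
  intro operands operators hpre
  obtain ⟨hne, hrows, holen, hop⟩ := hpre
  unfold A A_alt
  simp only []
  -- B side: exchange the loop order
  rw [exchange (PySem.List.pyGetD operands 0 []).length
      (fun c a row => BStep operators row c a) (BInit operators) operands]
  -- A side: the grand-total fold is a sum over the columns
  rw [PySem.List.foldl_add _ (fun col => AExprEval operands operators col) 0,
      PySem.List.pyRange_zero_nat, List.map_map, zero_add]
  -- now both sides are sums over List.range cols; compare columnwise
  congr 1
  apply List.map_congr_left
  intro c hc
  have hc' : c < (operands.headD []).length := by
    have : PySem.List.pyGetD operands 0 [] = operands.headD [] := by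
      cases operands <;> simp [PySem.List.pyGetD_zero]
    rw [this] at hc
    simpa using List.mem_range.mp hc
  exact col_eq operands operators c (hop c hc')

-- ===== VERDICT (by name: the statement is the Claim_ definition above) =====
theorem A_spec : Claim_equal_A := by
  intro operands operators _ hpre
  exact A_eq_alt operands operators hpre
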